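-- pv_equiv track=rewrite | github.com/terry109011/My-Python-Projects | List Practice (P21 - P26)/Project 24 - Cryptography/main_optimised.py | refactor_position
-- ===== SOURCE A (Python) =====
-- def refactor_position(shifted_position, cipher_type):
--     if cipher_type == 'E' or cipher_type == 'e':
--         while shifted_position > 25:
--             shifted_position = shifted_position - 26
--         return shifted_position
--     elif cipher_type == 'D' or cipher_type == 'd':
--         while shifted_position < 0:
--             shifted_position = shifted_position + 26
--         return shifted_position
-- ===== SOURCE B (Python) =====
-- def refactor_position(shifted_position, cipher_type):
--     if cipher_type == 'E' or cipher_type == 'e':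
--         return shifted_position % 26 if shifted_position > 25 else shifted_position
--     elif cipher_type == 'D' or cipher_type == 'd':
--         return shifted_position % 26 if shifted_position < 0 else shifted_position
-- ===== Notes on version B (the rewrite author's own statement) =====
-- stated objective: faster
-- what changed: Replaces each repeated-subtract/add while loop with a single guarded modulo (shifted_position % 26), computing the loop's fixed point in one step.
-- outside the precondition, e.g. on refactor_position(5, 'x'): A returns None, B returns None
import Mathlib
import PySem

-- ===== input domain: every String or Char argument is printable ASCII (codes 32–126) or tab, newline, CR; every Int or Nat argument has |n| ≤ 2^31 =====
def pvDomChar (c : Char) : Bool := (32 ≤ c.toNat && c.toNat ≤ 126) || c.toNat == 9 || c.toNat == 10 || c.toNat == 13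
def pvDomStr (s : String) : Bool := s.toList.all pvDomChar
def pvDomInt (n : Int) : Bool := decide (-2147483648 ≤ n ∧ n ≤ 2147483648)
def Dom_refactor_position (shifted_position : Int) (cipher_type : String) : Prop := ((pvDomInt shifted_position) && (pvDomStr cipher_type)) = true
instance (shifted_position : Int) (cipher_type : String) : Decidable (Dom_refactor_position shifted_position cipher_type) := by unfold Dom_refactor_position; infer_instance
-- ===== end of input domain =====

-- B replaces each while loop by one guarded modulo (O(1) instead of O(|n|/26)); return value only.

-- ===== PORT A =====
-- while shifted_position > 25: shifted_position -= 26
def pvLoopE (p : Int) : Int :=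
  if p > 25 then pvLoopE (p - 26) else p
termination_by (p - 25).toNat
decreasing_by omega

-- while shifted_position < 0: shifted_position += 26
def pvLoopD (p : Int) : Int :=
  if p < 0 then pvLoopD (p + 26) else p
termination_by (-p).toNat
decreasing_by omega

def refactor_position (shifted_position : Int) (cipher_type : String) : Int :=
  if cipher_type = "E" ∨ cipher_type = "e" then
    pvLoopE shifted_position
  else if cipher_type = "D" ∨ cipher_type = "d" then
    pvLoopD shifted_position
  else 0  -- Python returns None here; excluded by Pre_

-- ===== PORT B =====
def refactor_position_alt (shifted_position : Int) (cipher_type : String) : Int :=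
  if cipher_type = "E" ∨ cipher_type = "e" then
    if shifted_position > 25 then PySem.Int.mod shifted_position 26 else shifted_position
  else if cipher_type = "D" ∨ cipher_type = "d" then
    if shifted_position < 0 then PySem.Int.mod shifted_position 26 else shifted_position
  else 0  -- Python returns None here; excluded by Pre_

-- ===== PRECONDITION & SPEC =====
-- Pre_ excludes unrecognized cipher types, on which both Pythons fall through and return None, not an Int.
def Pre_refactor_position (shifted_position : Int) (cipher_type : String) : Prop :=
  cipher_type = "E" ∨ cipher_type = "e" ∨ cipher_type = "D" ∨ cipher_type = "d"
instance (shifted_position : Int) (cipher_type : String) : Decidable (Pre_refactor_position shifted_position cipher_type) := by unfold Pre_refactor_position; infer_instance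

def pvWitness_refactor_position : Int × String := (30, "E")

def Spec_refactor_position (shifted_position : Int) (cipher_type : String) (out : Int) : Prop := out = refactor_position_alt shifted_position cipher_type
instance (shifted_position : Int) (cipher_type : String) (out : Int) : Decidable (Spec_refactor_position shifted_position cipher_type out) := by unfold Spec_refactor_position; infer_instance

-- ===== CLAIM (what is proved, stated in full; the proofs are below) =====
def Claim_equal_refactor_position : Prop := ∀ (shifted_position : Int) (cipher_type : String), Dom_refactor_position shifted_position cipher_type → Pre_refactor_position shifted_position cipher_type → Spec_refactor_position shifted_position cipher_type (refactor_position shifted_position cipher_type)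

-- ===== LEMMAS AND PROOFS =====
theorem pvLoopE_eq (p : Int) : pvLoopE p = if p > 25 then PySem.Int.mod p 26 else p := by
  induction p using pvLoopE.induct with
  | case1 p h ih =>
    rw [pvLoopE, if_pos h, ih]
    simp only [PySem.Int.mod_eq_emod_of_pos (by omega : (0:Int) < 26)]
    split_ifs <;> omega
  | case2 p h =>
    rw [pvLoopE, if_neg h, if_neg h]

theorem pvLoopD_eq (p : Int) : pvLoopD p = if p < 0 then PySem.Int.mod p 26 else p := by
  induction p using pvLoopD.induct with
  | case1 p h ih =>
    rw [pvLoopD, if_pos h, ih]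
    simp only [PySem.Int.mod_eq_emod_of_pos (by omega : (0:Int) < 26)]
    split_ifs <;> omega
  | case2 p h =>
    rw [pvLoopD, if_neg h, if_neg h]

-- ===== VERDICT (by name: the statement is the Claim_ definition above) =====
theorem refactor_position_spec : Claim_equal_refactor_position := by
  intro p ct _ _
  unfold Spec_refactor_position refactor_position refactor_position_alt
  split_ifs <;> simp only [pvLoopE_eq, pvLoopD_eq,
    PySem.Int.mod_eq_emod_of_pos (by omega : (0:Int) < 26)] <;> split_ifs <;> omega
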